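-- pv_equiv track=rewrite | github.com/imjunxian/CCS592_Assignment_2 | test/bellman_ford.py | cycle_path
-- ===== SOURCE A (Python) =====
-- from typing import List, Optional, Set, Tuple
--
-- def cycle_path(parent: List[Optional[int]], offending: Tuple[int, int, int]) -> List[int]:
--     """
--     Return the negative cycle in the *forward* edge direction,
--     rotated so that it starts with the smallest-labelled vertex.
--
--     Example for the assignment graph: [3, 4, 5, 3]
--     """
--     # 1.  Walk predecessors once → backward order
--     start = offending[1]                    # head (v) of the offending edge
--     backward = [start]
--     cur = parent[start]                     # type: ignore[arg-type]
--     while cur != start: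
--         backward.append(cur)                # type: ignore[arg-type]
--         cur = parent[cur]                   # type: ignore[arg-type]
--     backward.append(start)                  # close the loop
--
--     # 2.  Reverse → forward edge direction
--     fwd = backward[::-1]
--
--     # 3.  Rotate so the smallest vertex is first (purely aesthetic)
--     smallest = min(fwd[:-1])                # ignore the duplicate last element
--     i = fwd.index(smallest)
--     cycle = fwd[i:-1] + fwd[:i] + [smallest]
--     return cycle
-- ===== SOURCE B (Python) =====
-- def cycle_path(parent, offending):
--     # Forward successor map instead of reverse+slice rotation.
--     start = offending[1]
--     succ = {}
--     node = start
--     while True: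
--         p = parent[node]
--         succ[p] = node
--         if p == start:
--             break
--         node = p
--     smallest = min(succ)
--     out = [smallest]
--     v = smallest
--     for _ in range(len(succ)):
--         v = succ[v]
--         out.append(v)
--     return out
-- ===== Notes on version B (the rewrite author's own statement) =====
-- stated objective: alternative
-- what changed: B replaces A's backward-list + reverse + index + slice-concat rotation by a forward successor dictionary built during the single predecessor walk, then emits the cycle by following that map from the smallest vertex.
import Mathlib
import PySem

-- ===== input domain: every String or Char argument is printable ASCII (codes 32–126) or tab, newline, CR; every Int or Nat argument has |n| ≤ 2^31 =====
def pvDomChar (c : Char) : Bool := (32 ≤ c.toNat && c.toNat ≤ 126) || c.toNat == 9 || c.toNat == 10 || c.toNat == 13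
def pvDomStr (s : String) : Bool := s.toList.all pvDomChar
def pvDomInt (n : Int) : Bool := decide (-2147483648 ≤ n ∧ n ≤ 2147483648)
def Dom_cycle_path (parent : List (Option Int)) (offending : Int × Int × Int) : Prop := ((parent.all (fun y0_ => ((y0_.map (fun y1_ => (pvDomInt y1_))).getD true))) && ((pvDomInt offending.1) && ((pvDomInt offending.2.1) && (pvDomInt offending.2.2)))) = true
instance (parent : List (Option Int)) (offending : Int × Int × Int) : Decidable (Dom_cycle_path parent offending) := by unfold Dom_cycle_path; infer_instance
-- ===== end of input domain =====

-- B replaces A's reverse + index + slice rotation by a forward successor dictionary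
-- built during the single predecessor walk, then reads the cycle off by following it
-- from the smallest vertex (objective: alternative decomposition, same cost).


-- ===== PORT A =====
-- one Python step 'parent[cur]': IndexError or a None entry (→ TypeError on the next
-- subscript) both become none and are excluded by Pre_.
def cpStep (parent : List (Option Int)) (cur : Int) : Option Int :=
  (PySem.List.pyGet? parent cur).bind id

-- the 'while cur != start' walk, fuelled; 2*len+2 fuel is enough for every
-- terminating Python run (visited ints are distinct and lie in [-len, len)).
def cpWalkA (parent : List (Option Int)) (start : Int) : Nat → Int → List Int → Option (List Int)
  | 0, _, _ => none
  | fuel + 1, cur, backward =>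
    if cur = start then some backward
    else
      match cpStep parent cur with
      | none => none
      | some nxt => cpWalkA parent start fuel nxt (backward ++ [cur])

def cycle_path (parent : List (Option Int)) (offending : Int × Int × Int) : List Int :=
  let start := offending.2.1
  match cpStep parent start with
  | none => []                       -- parent[start] raises: excluded by Pre_
  | some cur0 =>
    match cpWalkA parent start (2 * parent.length + 2) cur0 [start] with
    | none => []                     -- walk never returns to start (Python diverges/raises): excluded by Pre_
    | some bw =>
      let backward := bw ++ [start]
      let fwd := (PySem.List.slice? backward none none (-1)).getD []   -- backward[::-1]
      match PySem.List.min? (PySem.List.slice fwd none (some (-1))) (fun x => x) with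
      | none => []                   -- min of empty: unreachable (backward has ≥ 2 elements)
      | some smallest =>
        match PySem.List.index? fwd smallest with
        | none => []                 -- unreachable: smallest ∈ fwd
        | some i =>
          PySem.List.slice fwd (some (i : Int)) (some (-1)) ++
            PySem.List.slice fwd none (some (i : Int)) ++ [smallest]

-- ===== PORT B =====
-- the 'while True' walk of Source B: insert succ[p] = node, stop when p == start
def cpWalkB (parent : List (Option Int)) (start : Int) :
    Nat → Int → PySem.Dict Int Int → Option (PySem.Dict Int Int)
  | 0, _, _ => none
  | fuel + 1, node, succ =>
    match cpStep parent node with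
    | none => none
    | some p =>
      let succ' := succ.insert p node
      if p = start then some succ' else cpWalkB parent start fuel p succ'

-- the 'for _ in range(len(succ)): v = succ[v]; out.append(v)' loop of Source B
def cpFollow (succ : PySem.Dict Int Int) : Nat → Int → List Int → List Int
  | 0, _, out => out
  | n + 1, v, out =>
    match succ.get? v with
    | none => out                    -- KeyError: unreachable inside Pre_
    | some w => cpFollow succ n w (out ++ [w])

def cycle_path_alt (parent : List (Option Int)) (offending : Int × Int × Int) : List Int :=
  let start := offending.2.1
  match cpWalkB parent start (2 * parent.length + 2) start PySem.Dict.empty with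
  | none => []                       -- excluded by Pre_
  | some succ =>
    match PySem.List.min? succ.keys (fun x => x) with
    | none => []                     -- unreachable: succ is never empty
    | some smallest => cpFollow succ succ.size smallest [smallest]

-- ===== PRECONDITION & SPEC =====
-- Pre_: offending[1] is a periodic point of the predecessor step map (all subscripts
-- legal, no None entry met along the cycle); exactly the inputs where A's while-loop
-- terminates normally, since any terminating walk visits distinct ints in [-len, len).
def Pre_cycle_path (parent : List (Option Int)) (offending : Int × Int × Int) : Prop :=
  ∃ k : Nat, k < 2 * parent.length + 2 ∧
    (fun o => Option.bind o (cpStep parent))^[k + 1] (some offending.2.1) = some offending.2.1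

instance (parent : List (Option Int)) (offending : Int × Int × Int) : Decidable (Pre_cycle_path parent offending) := by
  unfold Pre_cycle_path; infer_instance

def pvWitness_cycle_path : List (Option Int) × (Int × Int × Int) :=
  ([some 0, some 3, some 1, some 2], (2, 1, 0))

def Spec_cycle_path (parent : List (Option Int)) (offending : Int × Int × Int) (out : List Int) : Prop := out = cycle_path_alt parent offending
instance (parent : List (Option Int)) (offending : Int × Int × Int) (out : List Int) : Decidable (Spec_cycle_path parent offending out) := by unfold Spec_cycle_path; infer_instance

-- ===== CLAIM (what is proved, stated in full; the proofs are below) =====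
def Claim_equal_cycle_path : Prop := ∀ (parent : List (Option Int)) (offending : Int × Int × Int), Dom_cycle_path parent offending → Pre_cycle_path parent offending → Spec_cycle_path parent offending (cycle_path parent offending)

-- ===== LEMMAS AND PROOFS =====

-- the predecessor chain after n steps (none = an index/None error along the way)
def cpIter (parent : List (Option Int)) : Nat → Int → Option Int
  | 0, v => some v
  | n + 1, v =>
    match cpStep parent v with
    | none => none
    | some w => cpIter parent n w

lemma iterate_bind_none (parent : List (Option Int)) :
    ∀ (m : Nat), (fun o => Option.bind o (cpStep parent))^[m] (none : Option Int) = none := by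
  intro m
  induction m with
  | zero => rfl
  | succ n ih => rw [Function.iterate_succ_apply]; exact ih

lemma cpIter_eq_iterate (parent : List (Option Int)) :
    ∀ (m : Nat) (v : Int),
      cpIter parent m v = (fun o => Option.bind o (cpStep parent))^[m] (some v) := by
  intro m
  induction m with
  | zero => intro v; rfl
  | succ n ih =>
    intro v
    rw [Function.iterate_succ_apply]
    show cpIter parent (n + 1) v = (fun o => Option.bind o (cpStep parent))^[n] ((some v).bind (cpStep parent))
    rw [cpIter]
    have hb : (some v).bind (cpStep parent) = cpStep parent v := rfl
    rw [hb]
    cases hs : cpStep parent v with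
    | none => exact (iterate_bind_none parent n).symm
    | some w => exact ih w

-- the canonical walk: nodes from cur up to and including the first 'start'
def cpPath (parent : List (Option Int)) (start : Int) : Nat → Int → Option (List Int)
  | 0, _ => none
  | fuel + 1, cur =>
    if cur = start then some [start]
    else
      match cpStep parent cur with
      | none => none
      | some nxt => (cpPath parent start fuel nxt).map (cur :: ·)

-- the successor dictionary built from the consecutive pairs of prev :: l
def buildSucc (succ : PySem.Dict Int Int) : Int → List Int → PySem.Dict Int Int
  | _, [] => succ
  | prev, x :: xs => buildSucc (succ.insert x prev) x xs

lemma cpPath_mono (parent : List (Option Int)) (start : Int) :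
    ∀ (f f' : Nat) (cur : Int) (l : List Int), f ≤ f' →
      cpPath parent start f cur = some l → cpPath parent start f' cur = some l := by
  intro f
  induction f with
  | zero => intro f' cur l _ h; simp [cpPath] at h
  | succ n ih =>
    intro f' cur l hle h
    obtain ⟨m, rfl⟩ : ∃ m, f' = m + 1 := ⟨f' - 1, by omega⟩
    by_cases hc : cur = start
    · simpa [cpPath, hc] using h
    · cases hs : cpStep parent cur with
      | none => simp [cpPath, hc, hs] at h
      | some nxt =>
        simp only [cpPath, if_neg hc, hs, Option.map_eq_some_iff] at h ⊢
        obtain ⟨l', hl', rfl⟩ := h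
        exact ⟨l', ih m nxt l' (by omega) hl', rfl⟩

lemma cpPath_irrel (parent : List (Option Int)) (start : Int)
    (f g : Nat) (cur : Int) (l m : List Int)
    (hf : cpPath parent start f cur = some l) (hg : cpPath parent start g cur = some m) :
    l = m := by
  rcases le_total f g with h | h
  · have := cpPath_mono parent start f g cur l h hf
    rw [this] at hg; exact Option.some.inj hg
  · have := cpPath_mono parent start g f cur m h hg
    rw [this] at hf; exact (Option.some.inj hf).symm

lemma cpPath_last (parent : List (Option Int)) (start : Int) :
    ∀ (f : Nat) (cur : Int) (l : List Int), cpPath parent start f cur = some l →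
      ∃ l0, l = l0 ++ [start] := by
  intro f
  induction f with
  | zero => intro cur l h; simp [cpPath] at h
  | succ n ih =>
    intro cur l h
    by_cases hc : cur = start
    · exact ⟨[], by simpa [cpPath, hc] using h.symm⟩
    · cases hs : cpStep parent cur with
      | none => simp [cpPath, hc, hs] at h
      | some nxt =>
        simp only [cpPath, if_neg hc, hs, Option.map_eq_some_iff] at h
        obtain ⟨l', hl', rfl⟩ := h
        obtain ⟨l0, rfl⟩ := ih nxt l' hl'
        exact ⟨cur :: l0, rfl⟩

lemma cpPath_suffix (parent : List (Option Int)) (start : Int) :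
    ∀ (f : Nat) (cur : Int) (l : List Int), cpPath parent start f cur = some l →
      ∀ (j : Nat) (hj : j < l.length), cpPath parent start f (l[j]) = some (l.drop j) := by
  intro f
  induction f with
  | zero => intro cur l h; simp [cpPath] at h
  | succ n ih =>
    intro cur l h j hj
    have hcopy := h
    by_cases hc : cur = start
    · subst hc
      have hl : l = [cur] := by simpa [cpPath] using h.symm
      subst hl
      have hj0 : j = 0 := by simp at hj; omega
      subst hj0
      simpa using hcopy
    · cases hs : cpStep parent cur with
      | none => simp [cpPath, hc, hs] at h
      | some nxt =>
        simp only [cpPath, if_neg hc, hs, Option.map_eq_some_iff] at h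
        obtain ⟨l', hl', rfl⟩ := h
        match j with
        | 0 => simpa using hcopy
        | j + 1 =>
          have hj' : j < l'.length := by simpa using hj
          have := ih nxt l' hl' j hj'
          simpa using cpPath_mono parent start n (n + 1) _ _ (by omega) this

lemma cpPath_nodup (parent : List (Option Int)) (start : Int) :
    ∀ (f : Nat) (cur : Int) (l : List Int), cpPath parent start f cur = some l →
      l.Nodup := by
  intro f
  induction f with
  | zero => intro cur l h; simp [cpPath] at h
  | succ n ih =>
    intro cur l h
    have hcopy := h
    by_cases hc : cur = start
    · have hl : l = [start] := by simpa [cpPath, hc] using h.symm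
      subst hl; simp
    · cases hs : cpStep parent cur with
      | none => simp [cpPath, hc, hs] at h
      | some nxt =>
        simp only [cpPath, if_neg hc, hs, Option.map_eq_some_iff] at h
        obtain ⟨l', hl', rfl⟩ := h
        refine List.nodup_cons.mpr ⟨?_, ih nxt l' hl'⟩
        intro hmem
        obtain ⟨j, hj, hje⟩ := List.getElem_of_mem hmem
        have hsuf := cpPath_suffix parent start n nxt l' hl' j hj
        rw [hje] at hsuf
        have heq := cpPath_irrel parent start (n + 1) n cur _ _ hcopy hsuf
        have hlen : (cur :: l').length = (l'.drop j).length := by rw [heq]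
        simp [List.length_drop] at hlen
        omega

lemma cpPath_exists (parent : List (Option Int)) (start : Int) :
    ∀ (m : Nat) (v : Int), cpIter parent m v = some start →
      ∀ (f : Nat), m < f → ∃ l, cpPath parent start f v = some l := by
  intro m
  induction m with
  | zero =>
    intro v h f hf
    have hv : v = start := Option.some.inj (by simpa [cpIter] using h)
    obtain ⟨g, rfl⟩ : ∃ g, f = g + 1 := ⟨f - 1, by omega⟩
    exact ⟨[start], by simp [cpPath, hv]⟩
  | succ n ih =>
    intro v h f hf
    obtain ⟨g, rfl⟩ : ∃ g, f = g + 1 := ⟨f - 1, by omega⟩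
    by_cases hv : v = start
    · exact ⟨[start], by simp [cpPath, hv]⟩
    · cases hs : cpStep parent v with
      | none => simp [cpIter, hs] at h
      | some w =>
        rw [cpIter, hs] at h
        obtain ⟨l', hl'⟩ := ih w h g (by omega)
        exact ⟨v :: l', by simp [cpPath, hv, hs, hl']⟩

lemma cpWalkA_eq (parent : List (Option Int)) (start : Int) :
    ∀ (f : Nat) (cur : Int) (acc : List Int),
      cpWalkA parent start f cur acc =
        (cpPath parent start f cur).map (fun l => acc ++ l.dropLast) := by
  intro f
  induction f with
  | zero => intro cur acc; simp [cpWalkA, cpPath]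
  | succ n ih =>
    intro cur acc
    by_cases hc : cur = start
    · simp [cpWalkA, cpPath, hc]
    · cases hs : cpStep parent cur with
      | none => simp [cpWalkA, cpPath, hc, hs]
      | some nxt =>
        simp only [cpWalkA, cpPath, if_neg hc, hs]
        rw [ih nxt (acc ++ [cur])]
        cases hl : cpPath parent start n nxt with
        | none => simp
        | some l =>
          obtain ⟨l0, rfl⟩ := cpPath_last parent start n nxt l hl
          simp [List.dropLast_cons_of_ne_nil]

lemma cpWalkB_eq (parent : List (Option Int)) (start : Int) :
    ∀ (f : Nat) (node cur : Int) (succ0 : PySem.Dict Int Int) (l : List Int),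
      cpStep parent node = some cur → cpPath parent start f cur = some l →
      cpWalkB parent start f node succ0 = some (buildSucc succ0 node l) := by
  intro f
  induction f with
  | zero => intro node cur succ0 l _ h; simp [cpPath] at h
  | succ n ih =>
    intro node cur succ0 l hstep h
    by_cases hc : cur = start
    · have hl : l = [start] := by simpa [cpPath, hc] using h.symm
      subst hl
      simp [cpWalkB, hstep, hc, buildSucc]
    · cases hs : cpStep parent cur with
      | none => simp [cpPath, hc, hs] at h
      | some nxt =>
        simp only [cpPath, if_neg hc, hs, Option.map_eq_some_iff] at h
        obtain ⟨l', hl', rfl⟩ := h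
        simp only [cpWalkB, hstep, if_neg hc]
        rw [ih cur nxt (succ0.insert cur node) l' hs hl']
        rfl

lemma buildSucc_keys :
    ∀ (l : List Int) (succ0 : PySem.Dict Int Int) (prev : Int), l.Nodup →
      (∀ x ∈ l, succ0.contains x = false) →
      (buildSucc succ0 prev l).keys = succ0.keys ++ l := by
  intro l
  induction l with
  | nil => intro succ0 prev _ _; simp [buildSucc]
  | cons a t ih =>
    intro succ0 prev hnd hfresh
    rw [buildSucc]
    rw [ih (succ0.insert a prev) a (List.nodup_cons.mp hnd).2 ?fresh]
    · rw [PySem.Dict.keys_insert_of_not_contains succ0 prev (hfresh a (by simp))]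
      simp
    case fresh =>
      intro x hx
      rw [PySem.Dict.contains_insert]
      have hxa : x ≠ a := fun h => (List.nodup_cons.mp hnd).1 (h ▸ hx)
      simp [hxa, hfresh x (List.mem_cons_of_mem a hx)]

lemma buildSucc_get_notmem :
    ∀ (l : List Int) (succ0 : PySem.Dict Int Int) (prev x : Int), x ∉ l →
      (buildSucc succ0 prev l).get? x = succ0.get? x := by
  intro l
  induction l with
  | nil => intro succ0 prev x _; simp [buildSucc]
  | cons a t ih =>
    intro succ0 prev x hx
    rw [buildSucc, ih _ a x (fun h => hx (List.mem_cons_of_mem a h))]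
    exact PySem.Dict.get?_insert_of_ne succ0 prev (fun h => hx (by simp [h]))

lemma buildSucc_get_head (t : List Int) (succ0 : PySem.Dict Int Int) (prev a : Int)
    (ha : a ∉ t) :
    (buildSucc succ0 prev (a :: t)).get? a = some prev := by
  rw [buildSucc, buildSucc_get_notmem t _ a a ha]
  exact PySem.Dict.get?_insert_self succ0 a prev

lemma buildSucc_consec :
    ∀ (l : List Int) (succ0 : PySem.Dict Int Int) (prev : Int), l.Nodup →
      ∀ (j : Nat) (hj : j + 1 < l.length),
        (buildSucc succ0 prev l).get? (l[j + 1]) = some l[j] := by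
  intro l
  induction l with
  | nil => intro _ _ _ j hj; simp at hj
  | cons a t ih =>
    intro succ0 prev hnd j hj
    match j, t, hj with
    | 0, b :: t', hj =>
      have hb : b ∉ t' := (List.nodup_cons.mp (List.nodup_cons.mp hnd).2).1
      show (buildSucc (succ0.insert a prev) a (b :: t')).get? b = some a
      exact buildSucc_get_head t' _ a b hb
    | j + 1, t, hj =>
      rw [buildSucc]
      have hj' : j + 1 < t.length := by simpa using hj
      have := ih (succ0.insert a prev) a (List.nodup_cons.mp hnd).2 j hj'
      simpa using this

lemma min?_id_perm (xs ys : List Int) (h : xs.Perm ys) :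
    PySem.List.min? xs (fun x => x) = PySem.List.min? ys (fun x => x) := by
  cases hx : PySem.List.min? xs (fun x => x) with
  | none =>
    rw [PySem.List.min?_eq_none_iff] at hx
    subst hx
    have hy : ys = [] := h.symm.eq_nil
    subst hy
    rfl
  | some m =>
    cases hy : PySem.List.min? ys (fun x => x) with
    | none =>
      rw [PySem.List.min?_eq_none_iff] at hy
      subst hy
      have hx' : xs = [] := h.eq_nil
      subst hx'
      rw [(PySem.List.min?_eq_none_iff _ _).mpr rfl] at hx
      simp at hx
    | some m' =>
      have h1 : m ≤ m' := PySem.List.min?_isMin hx m' (h.symm.subset (PySem.List.min?_mem hy))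
      have h2 : m' ≤ m := PySem.List.min?_isMin hy m (h.subset (PySem.List.min?_mem hx))
      rw [le_antisymm h1 h2]

lemma cpFollow_window (succ : PySem.Dict Int Int) (C : List Int)
    (hsucc : ∀ (m : Nat) (h : m + 1 < C.length), succ.get? C[m] = some C[m + 1])
    (hwrap : ∀ (h : 0 < C.length), succ.get? C[C.length - 1] = some C[0]) :
    ∀ (n m : Nat) (out : List Int) (hm : m < C.length), n + m ≤ 2 * C.length - 1 →
      cpFollow succ n C[m] out = out ++ (C.drop (m + 1) ++ C).take n := by
  intro n
  induction n with
  | zero => intro m out hm hn; simp [cpFollow]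
  | succ n ih =>
    intro m out hm hn
    by_cases hm1 : m + 1 < C.length
    · rw [cpFollow, hsucc m hm1]
      show cpFollow succ n C[m + 1] (out ++ [C[m + 1]]) = _
      rw [ih (m + 1) (out ++ [C[m + 1]]) hm1 (by omega), List.drop_eq_getElem_cons hm1,
        List.cons_append, List.take_succ_cons]
      simp
    · have hm' : m = C.length - 1 := by omega
      subst hm'
      rw [cpFollow, hwrap (by omega)]
      show cpFollow succ n C[0] (out ++ [C[0]]) = _
      rw [ih 0 (out ++ [C[0]]) (by omega) (by omega)]
      have hdrop : C.drop (C.length - 1 + 1) = [] := List.drop_eq_nil_of_le (by omega)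
      rw [hdrop]
      have hn' : n ≤ (C.drop 1).length := by
        have := List.length_drop (i := 1) (l := C); omega
      rw [List.take_append_of_le_length hn']
      have hC : C = C[0] :: C.drop 1 := by
        conv_lhs => rw [← List.drop_zero (l := C)]
        rw [List.drop_eq_getElem_cons (by omega)]
      conv_rhs => rw [List.nil_append, hC]
      rw [List.take_succ_cons]
      simp

lemma dict_size_eq_keys_length (d : PySem.Dict Int Int) : d.size = d.keys.length := by
  simp [PySem.Dict.size, PySem.Dict.keys]

-- ===== VERDICT (by name: the statement is the Claim_ definition above) =====

lemma slice_mid (C : List Int) (s : Int) (i : Nat) (hi : i < C.length) :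
    PySem.List.slice (C ++ [s]) (some (i : Int)) (some (-1)) = C.drop i := by
  simp only [PySem.List.slice, PySem.List.clampIdx_natCast, PySem.List.clampIdx_neg_one,
    List.length_append, List.length_cons, List.length_nil]
  have h1 : min i (C.length + 1) = i := by omega
  rw [h1, List.drop_append_of_le_length (by omega)]
  have h2 : C.length + 1 - 1 - i = (C.drop i).length := by simp
  rw [h2, List.take_append_of_le_length (le_refl _), List.take_length]

lemma buildSucc_first (l : List Int) (prev : Int) (hl : 0 < l.length) (hnd : l.Nodup) :
    (buildSucc PySem.Dict.empty prev l).get? (l[0]'hl) = some prev := by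
  cases l with
  | nil => simp at hl
  | cons a t =>
    exact buildSucc_get_head t PySem.Dict.empty prev a (List.nodup_cons.mp hnd).1

lemma rotate_eq (C : List Int) (i : Nat) (hi : i < C.length) :
    C.drop i ++ C.take i ++ [C[i]] = [C[i]] ++ (C.drop (i + 1) ++ C).take C.length := by
  rw [List.take_append, List.take_of_length_le (l := C.drop (i + 1)) (by simp)]
  have h2 : C.length - (C.drop (i + 1)).length = i + 1 := by simp; omega
  have h3 : C.drop i = C[i] :: C.drop (i + 1) := List.drop_eq_getElem_cons hi
  have h4 : C.take (i + 1) = (C.take i).concat C[i] := (List.take_concat_get hi).symm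
  rw [h2]
  calc C.drop i ++ C.take i ++ [C[i]]
      = (C[i] :: C.drop (i + 1)) ++ C.take i ++ [C[i]] := by rw [← h3]
    _ = [C[i]] ++ (C.drop (i + 1) ++ (C.take i ++ [C[i]])) := by
        simp only [List.cons_append, List.append_assoc, List.nil_append]
    _ = [C[i]] ++ (C.drop (i + 1) ++ C.take (i + 1)) := by
        rw [h4, List.concat_eq_append]

theorem cycle_path_spec : Claim_equal_cycle_path := by
  intro parent offending hdom hpre
  unfold Spec_cycle_path
  obtain ⟨k, hk, hiter0⟩ := hpre
  set start := offending.2.1 with hstart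
  have hiter : cpIter parent (k + 1) start = some start := by
    rw [cpIter_eq_iterate]; exact hiter0
  -- peel the first step of the chain
  rw [cpIter] at hiter
  obtain ⟨cur0, hs0, hit0⟩ :
      ∃ cur0, cpStep parent start = some cur0 ∧ cpIter parent k cur0 = some start := by
    cases hs : cpStep parent start with
    | none => rw [hs] at hiter; simp at hiter
    | some w => rw [hs] at hiter; exact ⟨w, rfl, hiter⟩
  -- the canonical walk exists
  obtain ⟨l, hl⟩ := cpPath_exists parent start k cur0 hit0 (2 * parent.length + 2) (by omega)
  have hnd : l.Nodup := cpPath_nodup parent start _ cur0 l hl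
  obtain ⟨l0, rfl⟩ := cpPath_last parent start _ cur0 l hl
  set C : List Int := (l0 ++ [start]).reverse with hCdef
  have hCrev : C = start :: l0.reverse := by simp [hCdef]
  have hLen : (l0 ++ [start]).length = C.length := by simp [hCdef]
  have hClen : C.length = l0.length + 1 := by simp [hCdef]
  have hLenR : (l0 ++ [start]).reverse.length = C.length := rfl
  have hC0 : ∀ (h : 0 < C.length), C[0] = start := by
    intro h; simp [hCrev]
  -- the minimum of the cycle and its first index
  obtain ⟨smallest, hmin⟩ : ∃ m, PySem.List.min? C (fun x => x) = some m := by
    cases hm : PySem.List.min? C (fun x => x) with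
    | none =>
      rw [PySem.List.min?_eq_none_iff] at hm
      simp [hCrev] at hm
    | some m => exact ⟨m, rfl⟩
  have hsmem : smallest ∈ C := PySem.List.min?_mem hmin
  obtain ⟨i, hidx⟩ : ∃ i, PySem.List.index? C smallest = some i := by
    cases hix : PySem.List.index? C smallest with
    | none => rw [PySem.List.index?_eq_none_iff] at hix; exact absurd hsmem hix
    | some i => exact ⟨i, rfl⟩
  obtain ⟨hi, hCi, _⟩ := PySem.List.getElem_of_index?_eq_some hidx
  -- ===== the A side =====
  have hwA : cpWalkA parent start (2 * parent.length + 2) cur0 [start] = some ([start] ++ l0) := by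
    rw [cpWalkA_eq parent start _ cur0 [start], hl]
    simp
  have hfwd : ([start] ++ l0 ++ [start]).reverse = C ++ [start] := by
    simp [hCdef]
  have hA : cycle_path parent offending =
      PySem.List.slice (C ++ [start]) (some (i : Int)) (some (-1)) ++
        PySem.List.slice (C ++ [start]) none (some (i : Int)) ++ [smallest] := by
    unfold cycle_path
    simp only [← hstart, hs0, hwA, PySem.List.slice?_none_none_neg_one, Option.getD_some,
      hfwd, PySem.List.slice_to_neg_one, List.dropLast_concat, hmin,
      PySem.List.index?_append_of_mem [start] hsmem, hidx]
  -- ===== the B side =====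
  set succ : PySem.Dict Int Int := buildSucc PySem.Dict.empty start (l0 ++ [start]) with hsuccdef
  have hwB : cpWalkB parent start (2 * parent.length + 2) start PySem.Dict.empty = some succ :=
    cpWalkB_eq parent start _ start cur0 PySem.Dict.empty (l0 ++ [start]) hs0 hl
  have hkeys : succ.keys = l0 ++ [start] := by
    rw [hsuccdef, buildSucc_keys (l0 ++ [start]) PySem.Dict.empty start hnd
      (fun x _ => PySem.Dict.contains_empty x), PySem.Dict.keys_empty, List.nil_append]
  have hminB : PySem.List.min? succ.keys (fun x => x) = some smallest := by
    rw [hkeys, min?_id_perm (l0 ++ [start]) C ((List.reverse_perm _).symm), hmin]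
  have hsize : succ.size = C.length := by
    rw [dict_size_eq_keys_length, hkeys, hLen]
  -- succ is the forward rotation map of C
  have hsuccC : ∀ (m : Nat) (h : m + 1 < C.length), succ.get? C[m] = some C[m + 1] := by
    intro m h
    show succ.get? ((l0 ++ [start]).reverse[m]'(by omega)) =
      some ((l0 ++ [start]).reverse[m + 1]'(by omega))
    rw [List.getElem_reverse, List.getElem_reverse]
    have e1 : (l0 ++ [start]).length - 1 - m = ((l0 ++ [start]).length - 2 - m) + 1 := by
      omega
    have e2 : (l0 ++ [start]).length - 1 - (m + 1) = (l0 ++ [start]).length - 2 - m := by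
      omega
    simp only [e1, e2]
    exact buildSucc_consec (l0 ++ [start]) PySem.Dict.empty start hnd _ (by omega)
  have hwrapC : ∀ (h : 0 < C.length), succ.get? C[C.length - 1] = some C[0] := by
    intro h
    rw [hC0 h]
    show succ.get? ((l0 ++ [start]).reverse[C.length - 1]'(by omega)) = some start
    rw [List.getElem_reverse]
    have e1 : (l0 ++ [start]).length - 1 - (C.length - 1) = 0 := by omega
    simp only [e1]
    exact buildSucc_first (l0 ++ [start]) start (by omega) hnd
  have hB : cycle_path_alt parent offending =
      [C[i]] ++ (C.drop (i + 1) ++ C).take C.length := by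
    unfold cycle_path_alt
    simp only [← hstart, hwB, hminB, hsize]
    rw [← hCi]
    exact cpFollow_window succ C hsuccC hwrapC C.length i [C[i]] hi (by omega)
  rw [hA, hB, slice_mid C start i hi, PySem.List.slice_to_natCast,
    List.take_append_of_le_length (le_of_lt hi), ← hCi]
  exact rotate_eq C i hi
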